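-- pv_equiv track=rewrite | github.com/Eko-Energia/can-mask-filter | src/filter_calculator.py | calculate_mask_filter
-- ===== SOURCE A (Python) =====
-- def calculate_mask_filter(selected_ids):
--     """
--     Calculates the mask and filter for a list of 11-bit CAN IDs.
--     Returns a tuple (mask, filter_val).
--     """
--     if not selected_ids:
--         return 0, 0
--
--     # Initialize mask to all 1s (11 bits)
--     mask = 0x7FF
--     # Initialize filter to the first ID (will be adjusted)
--     filter_val = selected_ids[0]
--
--     for can_id in selected_ids[1:]:
--         # XOR finds bits that are different
--         diff = filter_val ^ can_id
--         # If a bit is different, it must be 0 in the mask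
--         mask &= ~diff
--         # The filter value for those bits doesn't matter, but usually we keep them 0 or matching one
--         # To be consistent, we can enforce filter bits to be 0 where mask is 0
--         # But standard is: filter & mask == id & mask
--
--     # Clean up filter: clear bits where mask is 0
--     filter_val &= mask
--
--     return mask, filter_val
-- ===== SOURCE B (Python) =====
-- def calculate_mask_filter(selected_ids):
--     """
--     Calculates the mask and filter for a list of 11-bit CAN IDs.
--     Returns a tuple (mask, filter_val).
--     """
--     if not selected_ids:
--         return 0, 0
--
--     first = selected_ids[0]
--     mask = 0
--     # Build the mask bit by bit: a mask bit is 1 exactly when all IDs agree there.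
--     for bit in range(11):
--         b = (first >> bit) & 1
--         if all((cid >> bit) & 1 == b for cid in selected_ids):
--             mask |= 1 << bit
--     return mask, first & mask
-- ===== Notes on version B (the rewrite author's own statement) =====
-- stated objective: alternative
-- what changed: Instead of XOR-accumulating differences of each ID against the first and masking 0x7FF with the complement, B builds the mask bit-position by bit-position (for each of the 11 bit positions it checks whether all IDs agree there) and then takes filter = first & mask.
import Mathlib
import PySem

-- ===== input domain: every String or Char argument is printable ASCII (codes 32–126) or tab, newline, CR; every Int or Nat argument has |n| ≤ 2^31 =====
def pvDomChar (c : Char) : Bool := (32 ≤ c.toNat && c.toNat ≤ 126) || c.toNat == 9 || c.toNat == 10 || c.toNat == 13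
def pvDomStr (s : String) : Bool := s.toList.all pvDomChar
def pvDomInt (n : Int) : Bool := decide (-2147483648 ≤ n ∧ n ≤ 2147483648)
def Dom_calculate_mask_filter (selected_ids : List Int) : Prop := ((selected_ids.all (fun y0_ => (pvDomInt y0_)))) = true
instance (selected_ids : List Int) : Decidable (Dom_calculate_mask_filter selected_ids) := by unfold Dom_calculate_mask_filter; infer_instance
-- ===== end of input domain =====

-- B rebuilds the mask bit-position by bit-position (agreement of all IDs per bit) instead of
-- XOR-accumulating per-ID differences; an alternative decomposition, same exact results.


-- ===== PORT A =====
-- `selected_ids[0]` / `selected_ids[1:]` of the list already checked nonempty are taken by the match.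
def calculate_mask_filter (selected_ids : List Int) : Int × Int :=
  match selected_ids with
  | [] => (0, 0)
  | filter_val :: rest =>
    let mask : Int := 0x7FF
    let mask := rest.foldl
      (fun mask can_id => PySem.Int.band mask (Int.not (PySem.Int.bxor filter_val can_id))) mask
    let filter_val := PySem.Int.band filter_val mask
    (mask, filter_val)

-- ===== PORT B =====
-- `range(11)` is ported as `List.range 11` (its values 0..10 are the nonnegative shift counts).
def calculate_mask_filter_alt (selected_ids : List Int) : Int × Int :=
  match selected_ids with
  | [] => (0, 0)
  | first :: _ =>
    let mask : Int := (List.range 11).foldl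
      (fun mask (bit : Nat) =>
        let b := PySem.Int.band (first >>> bit) 1
        if selected_ids.all (fun cid => PySem.Int.band (cid >>> bit) 1 == b) then
          PySem.Int.bor mask ((1 : Int) <<< bit)
        else mask) 0
    (mask, PySem.Int.band first mask)

-- ===== PRECONDITION & SPEC =====
def Spec_calculate_mask_filter (selected_ids : List Int) (out : Int × Int) : Prop := out = calculate_mask_filter_alt selected_ids
instance (selected_ids : List Int) (out : Int × Int) : Decidable (Spec_calculate_mask_filter selected_ids out) := by unfold Spec_calculate_mask_filter; infer_instance

-- ===== CLAIM (what is proved, stated in full; the proofs are below) =====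
def Claim_equal_calculate_mask_filter : Prop := ∀ (selected_ids : List Int), Dom_calculate_mask_filter selected_ids → Spec_calculate_mask_filter selected_ids (calculate_mask_filter selected_ids)

-- ===== LEMMAS AND PROOFS =====

-- extensionality of Int via two's-complement bits
theorem pv_int_ext {a b : Int} (h : ∀ i, a.testBit i = b.testBit i) : a = b := by
  cases a with
  | ofNat m =>
    cases b with
    | ofNat n =>
      congr 1
      exact Nat.eq_of_testBit_eq (fun i => h i)
    | negSucc n =>
      exfalso
      have hi := h (max m n + 1)
      have h1 : m.testBit (max m n + 1) = false :=
        Nat.testBit_lt_two_pow (lt_of_le_of_lt (le_max_left m n) (Nat.lt_two_pow_self.trans_le (Nat.pow_le_pow_right (by norm_num) (by omega))))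
      have h2 : n.testBit (max m n + 1) = false :=
        Nat.testBit_lt_two_pow (lt_of_le_of_lt (le_max_right m n) (Nat.lt_two_pow_self.trans_le (Nat.pow_le_pow_right (by norm_num) (by omega))))
      simp [Int.testBit, h1, h2] at hi
  | negSucc m =>
    cases b with
    | ofNat n =>
      exfalso
      have hi := h (max m n + 1)
      have h1 : m.testBit (max m n + 1) = false :=
        Nat.testBit_lt_two_pow (lt_of_le_of_lt (le_max_left m n) (Nat.lt_two_pow_self.trans_le (Nat.pow_le_pow_right (by norm_num) (by omega))))
      have h2 : n.testBit (max m n + 1) = false :=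
        Nat.testBit_lt_two_pow (lt_of_le_of_lt (le_max_right m n) (Nat.lt_two_pow_self.trans_le (Nat.pow_le_pow_right (by norm_num) (by omega))))
      simp [Int.testBit, h1, h2] at hi
    | negSucc n =>
      congr 1
      refine Nat.eq_of_testBit_eq (fun i => ?_)
      have := h i
      simpa [Int.testBit] using this

theorem pv_ldiff_add_and (m n : Nat) : Nat.ldiff m n + (m &&& n) = m := by
  induction m using Nat.binaryRec generalizing n with
  | zero => simp [Nat.ldiff]
  | bit a m ih =>
    induction n using Nat.binaryRec with
    | zero => simp [Nat.ldiff]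
    | bit b n _ =>
      rw [Nat.ldiff_bit, Nat.land_bit, Nat.bit_val, Nat.bit_val, Nat.bit_val]
      have := ih n
      cases a <;> cases b <;> simp [Bool.toNat] <;> omega

-- PySem's Python-exact bitwise operations coincide with Mathlib's
theorem pv_band_eq_land (a b : Int) : PySem.Int.band a b = Int.land a b := by
  cases a with
  | ofNat m =>
    cases b with
    | ofNat n => simp [PySem.Int.band, Int.land]
    | negSucc n =>
      simp [PySem.Int.band, Int.land, Int.negSucc_eq]
      rw [if_neg (by omega)]
      have h := pv_ldiff_add_and m n
      have hle : m &&& n ≤ m := by omega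
      congr 1
      omega
  | negSucc m =>
    cases b with
    | ofNat n =>
      simp [PySem.Int.band, Int.land, Int.negSucc_eq]
      rw [if_neg (by omega)]
      have h := pv_ldiff_add_and n m
      congr 1
      omega
    | negSucc n =>
      simp [PySem.Int.band, Int.land, Int.negSucc_eq]
      rw [if_neg (by omega), if_neg (by omega)]
      omega

theorem pv_bor_eq_lor (a b : Int) : PySem.Int.bor a b = Int.lor a b := by
  cases a with
  | ofNat m =>
    cases b with
    | ofNat n => simp [PySem.Int.bor, Int.lor]
    | negSucc n =>
      simp [PySem.Int.bor, Int.lor, Int.negSucc_eq]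
      rw [if_neg (by omega)]
      have h := pv_ldiff_add_and n m
      omega
  | negSucc m =>
    cases b with
    | ofNat n =>
      simp [PySem.Int.bor, Int.lor, Int.negSucc_eq]
      rw [if_neg (by omega)]
      have h := pv_ldiff_add_and m n
      omega
    | negSucc n =>
      simp [PySem.Int.bor, Int.lor, Int.negSucc_eq]
      rw [if_neg (by omega), if_neg (by omega)]
      omega

theorem pv_bxor_eq_xor (a b : Int) : PySem.Int.bxor a b = Int.xor a b := by
  cases a with
  | ofNat m =>
    cases b with
    | ofNat n => simp [PySem.Int.bxor, Int.xor]
    | negSucc n =>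
      simp [PySem.Int.bxor, Int.xor, Int.negSucc_eq]
      rw [if_neg (by omega)]
      omega
  | negSucc m =>
    cases b with
    | ofNat n =>
      simp [PySem.Int.bxor, Int.xor, Int.negSucc_eq]
      rw [if_neg (by omega)]
      omega
    | negSucc n =>
      simp [PySem.Int.bxor, Int.xor, Int.negSucc_eq]
      rw [if_neg (by omega)]
      omega

theorem pv_not_eq_lnot (a : Int) : Int.not a = Int.lnot a := by
  cases a <;> rfl

theorem nat_ldiff_one (n : Nat) : Nat.ldiff 1 n = if n.testBit 0 then 0 else 1 := by
  rw [Nat.ldiff]; rw [Nat.bitwise]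
  simp [Nat.testBit]
  rcases Nat.mod_two_eq_zero_or_one n with h | h
  · simp [h]
  · simp [h]
    omega

theorem nat_sr_and_one (n k : Nat) : (n >>> k) &&& 1 = if n.testBit k then 1 else 0 := by
  simp [Nat.testBit, Nat.and_one_is_mod]
  rcases Nat.mod_two_eq_zero_or_one (n >>> k) with h | h <;> simp [h]

-- `(a >> k) & 1` reads bit k
theorem pv_band_sr_one (a : Int) (k : Nat) :
    PySem.Int.band (a >>> k) 1 = if a.testBit k then 1 else 0 := by
  rw [pv_band_eq_land]
  cases a with
  | ofNat m =>
    show Int.land (Int.ofNat (m >>> k)) (Int.ofNat 1) = _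
    rw [Int.land]
    show (Int.ofNat ((m >>> k) &&& 1)) = _
    rw [nat_sr_and_one]
    split <;> simp_all [Int.testBit]
  | negSucc m =>
    show Int.land (Int.negSucc (m >>> k)) (Int.ofNat 1) = _
    rw [Int.land]
    show (Int.ofNat (Nat.ldiff 1 (m >>> k))) = _
    rw [nat_ldiff_one]
    have h0 : (m >>> k).testBit 0 = m.testBit k := by
      simp
    rw [h0]
    have ht : (Int.negSucc m).testBit k = !m.testBit k := rfl
    rw [ht]
    cases m.testBit k <;> simp

theorem pv_testBit_one_shl (b i : Nat) : ((1 : Int) <<< b).testBit i = decide (b = i) := by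
  have h1 : ((1 : Int) <<< b) = Int.ofNat (1 <<< b) := rfl
  rw [h1]
  show Nat.testBit (1 <<< b) i = decide (b = i)
  rw [Nat.one_shiftLeft]
  exact Nat.testBit_two_pow

-- comparing `(c >> bit) & 1` with `(f >> bit) & 1` is comparing bits
theorem pv_cond_eq (c f : Int) (k : Nat) :
    (PySem.Int.band (c >>> k) 1 == PySem.Int.band (f >>> k) 1)
      = (c.testBit k == f.testBit k) := by
  rw [pv_band_sr_one, pv_band_sr_one]
  cases c.testBit k <;> cases f.testBit k <;> simp

-- A's accumulated mask, bit by bit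
theorem pv_maskA_testBit (f : Int) (xs : List Int) (m : Int) (i : Nat) :
    (xs.foldl (fun mask can_id => PySem.Int.band mask (Int.not (PySem.Int.bxor f can_id))) m).testBit i
      = (m.testBit i && xs.all (fun c => c.testBit i == f.testBit i)) := by
  induction xs generalizing m with
  | nil => simp
  | cons c xs ih =>
    rw [List.foldl_cons, ih]
    rw [pv_band_eq_land, pv_not_eq_lnot, pv_bxor_eq_xor]
    rw [Int.testBit_land, Int.testBit_lnot, Int.testBit_lxor]
    simp only [List.all_cons, Bool.and_assoc]
    cases m.testBit i <;> cases c.testBit i <;> cases f.testBit i <;> simp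

-- B's accumulated mask, bit by bit
theorem pv_maskB_testBit (f : Int) (ids : List Int) (bits : List Nat) (m : Int) (i : Nat) :
    (bits.foldl
      (fun mask (bit : Nat) =>
        let b := PySem.Int.band (f >>> bit) 1
        if ids.all (fun cid => PySem.Int.band (cid >>> bit) 1 == b) then
          PySem.Int.bor mask ((1 : Int) <<< bit)
        else mask) m).testBit i
      = (m.testBit i || (bits.contains i && ids.all (fun c => c.testBit i == f.testBit i))) := by
  induction bits generalizing m with
  | nil => simp
  | cons bit bits ih =>
    rw [List.foldl_cons, ih]
    have hall : (ids.all fun cid => PySem.Int.band (cid >>> bit) 1 == PySem.Int.band (f >>> bit) 1)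
        = ids.all (fun c => c.testBit bit == f.testBit bit) := by
      simp only [pv_cond_eq]
    simp only [List.contains_cons]
    by_cases hbi : bit = i
    · subst hbi
      rcases Bool.eq_false_or_eq_true (ids.all (fun c => c.testBit bit == f.testBit bit)) with hcb | hcb
      · rw [if_pos (by rw [hall]; exact hcb)]
        rw [pv_bor_eq_lor, Int.testBit_lor, pv_testBit_one_shl]
        simp [hcb]
      · rw [if_neg (by rw [hall, hcb]; simp)]
        simp [hcb]
    · have hib : (i == bit) = false := by simp; exact fun h => hbi h.symm
      rcases Bool.eq_false_or_eq_true (ids.all (fun c => c.testBit bit == f.testBit bit)) with hcb | hcb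
      · rw [if_pos (by rw [hall]; exact hcb)]
        rw [pv_bor_eq_lor, Int.testBit_lor, pv_testBit_one_shl]
        simp [hbi, hib]
      · rw [if_neg (by rw [hall, hcb]; simp)]
        simp [hib]

-- ===== VERDICT (by name: the statement is the Claim_ definition above) =====
theorem calculate_mask_filter_spec : Claim_equal_calculate_mask_filter := by
  intro ids _
  unfold Spec_calculate_mask_filter
  cases ids with
  | nil => rfl
  | cons f rest =>
    show (_, _) = (_, _)
    have hmask :
        rest.foldl (fun mask can_id => PySem.Int.band mask (Int.not (PySem.Int.bxor f can_id))) 0x7FF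
          = (List.range 11).foldl
              (fun mask (bit : Nat) =>
                let b := PySem.Int.band (f >>> bit) 1
                if (f :: rest).all (fun cid => PySem.Int.band (cid >>> bit) 1 == b) then
                  PySem.Int.bor mask ((1 : Int) <<< bit)
                else mask) 0 := by
      apply pv_int_ext
      intro i
      rw [pv_maskA_testBit, pv_maskB_testBit]
      have h2047 : (0x7FF : Int).testBit i = decide (i < 11) := by
        show Nat.testBit 2047 i = decide (i < 11)
        have : (2047 : Nat) = 2 ^ 11 - 1 := by norm_num
        rw [this, Nat.testBit_two_pow_sub_one]
      have h0 : (0 : Int).testBit i = false := by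
        show Nat.testBit 0 i = false
        exact Nat.zero_testBit i
      have hcont : (List.range 11).contains i = decide (i < 11) := by
        simp [List.mem_range]
      rw [h2047, h0, hcont, Bool.false_or, List.all_cons]
      simp
    rw [hmask]
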